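-- pv_equiv track=rewrite | github.com/siljakluge/ExplainabilityCC4 | plot_rew_decomp.py | _episode_boundaries
-- ===== SOURCE A (Python) =====
-- def _episode_boundaries(sorted_pairs):
--     boundaries = []
--     prev_ep = None
--     for i, (ep, _st) in enumerate(sorted_pairs):
--         if i == 0:
--             prev_ep = ep
--             continue
--         if ep != prev_ep:
--             boundaries.append(i)
--             prev_ep = ep
--     return boundaries
-- ===== SOURCE B (Python) =====
-- def _episode_boundaries(sorted_pairs):
--     # Run-length decomposition: split into consecutive runs of equal episode,
--     # then the boundaries are the prefix sums of all but the last run length.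
--     lens = []
--     rest = sorted_pairs
--     while rest:
--         k = 1
--         while k < len(rest) and rest[k][0] == rest[0][0]:
--             k += 1
--         lens.append(k)
--         rest = rest[k:]
--     out = []
--     acc = 0
--     for L in lens[:-1]:
--         acc += L
--         out.append(acc)
--     return out
-- ===== Notes on version B (the rewrite author's own statement) =====
-- stated objective: alternative
-- what changed: Replaces the index/previous-episode state machine with a run-length decomposition: split the list into consecutive runs of equal episode, then return the prefix sums of all run lengths except the last.
import Mathlib
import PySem

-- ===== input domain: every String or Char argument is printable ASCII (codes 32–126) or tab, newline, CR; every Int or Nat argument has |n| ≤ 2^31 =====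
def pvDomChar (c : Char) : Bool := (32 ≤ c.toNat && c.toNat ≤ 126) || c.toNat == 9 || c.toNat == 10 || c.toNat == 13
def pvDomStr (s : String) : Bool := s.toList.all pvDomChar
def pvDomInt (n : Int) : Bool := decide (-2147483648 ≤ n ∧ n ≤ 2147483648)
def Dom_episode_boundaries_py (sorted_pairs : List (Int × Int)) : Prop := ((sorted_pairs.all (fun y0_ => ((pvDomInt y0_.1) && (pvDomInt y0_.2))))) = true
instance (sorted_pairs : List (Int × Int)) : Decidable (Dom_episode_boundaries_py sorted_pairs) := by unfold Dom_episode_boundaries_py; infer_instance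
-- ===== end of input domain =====

-- B replaces A's previous-episode state machine by a run-length decomposition
-- (run lengths, then prefix sums of all but the last); alternative, same cost.

-- ===== PORT A =====
-- one step of A's loop: state = (boundaries, prev_ep); p = (i, (ep, st))
def pvStepA (st : List Int × Option Int) (p : Int × (Int × Int)) : List Int × Option Int :=
  if p.1 = 0 then (st.1, some p.2.1)
  else if some p.2.1 ≠ st.2 then (st.1 ++ [p.1], some p.2.1)
  else st

def episode_boundaries_py (sorted_pairs : List (Int × Int)) : List Int :=
  ((PySem.List.enumerate sorted_pairs).foldl pvStepA ([], none)).1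

-- ===== PORT B =====
-- lengths of the consecutive runs of equal episode (Source B's outer while loop)
def pvRunLens : List (Int × Int) → List Nat
  | [] => []
  | x :: xs =>
    (1 + (xs.takeWhile (fun y => y.1 == x.1)).length) ::
      pvRunLens (xs.dropWhile (fun y => y.1 == x.1))
termination_by l => l.length
decreasing_by
  simp only [List.length_cons]
  exact Nat.lt_succ_of_le (List.length_dropWhile_le _ _)

-- Source B's prefix-sum loop over lens[:-1]
def pvSumStep (st : Int × List Int) (L : Nat) : Int × List Int :=
  (st.1 + (L : Int), st.2 ++ [st.1 + (L : Int)])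

def episode_boundaries_py_alt (sorted_pairs : List (Int × Int)) : List Int :=
  (((pvRunLens sorted_pairs).dropLast).foldl pvSumStep (0, [])).2

-- ===== PRECONDITION & SPEC =====
def Spec_episode_boundaries_py (sorted_pairs : List (Int × Int)) (out : List Int) : Prop := out = episode_boundaries_py_alt sorted_pairs
instance (sorted_pairs : List (Int × Int)) (out : List Int) : Decidable (Spec_episode_boundaries_py sorted_pairs out) := by unfold Spec_episode_boundaries_py; infer_instance

-- ===== CLAIM (what is proved, stated in full; the proofs are below) =====
def Claim_equal_episode_boundaries_py : Prop := ∀ (sorted_pairs : List (Int × Int)), Dom_episode_boundaries_py sorted_pairs → Spec_episode_boundaries_py sorted_pairs (episode_boundaries_py sorted_pairs)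

-- ===== LEMMAS AND PROOFS =====

-- common specification: boundary indices given prev episode and current index
def pvG (prev : Int) (i : Int) : List (Int × Int) → List Int
  | [] => []
  | (ep, _) :: t => if ep = prev then pvG prev (i + 1) t else i :: pvG ep (i + 1) t

theorem pvA_foldl (xs : List (Int × Int)) : ∀ (i : Int) (bs : List Int) (prev : Int), 1 ≤ i →
    ((PySem.List.enumerate xs i).foldl pvStepA (bs, some prev)).1 = bs ++ pvG prev i xs := by
  induction xs with
  | nil => intro i bs prev _; simp [PySem.List.enumerate, pvG]
  | cons x t ih =>
    intro i bs prev hi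
    obtain ⟨ep, st⟩ := x
    rw [PySem.List.enumerate_cons]
    simp only [List.foldl_cons]
    by_cases h : ep = prev
    · have hs : pvStepA (bs, some prev) (i, (ep, st)) = (bs, some prev) := by
        simp [pvStepA, h]
      rw [hs, ih (i+1) bs prev (by omega)]
      simp [pvG, h]
    · have hs : pvStepA (bs, some prev) (i, (ep, st)) = (bs ++ [i], some ep) := by
        simp [pvStepA, h]; omega
      rw [hs, ih (i+1) (bs ++ [i]) ep (by omega)]
      simp [pvG, h]

theorem pvSums_acc (ls : List Nat) : ∀ (s : Int) (bs : List Int),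
    (ls.foldl pvSumStep (s, bs)).2 = bs ++ (ls.foldl pvSumStep (s, [])).2 := by
  induction ls with
  | nil => intro s bs; simp
  | cons L ls ih =>
    intro s bs
    simp only [List.foldl_cons, pvSumStep]
    rw [ih (s + L) (bs ++ [s + L]), ih (s + L) ([] ++ [s + L])]
    simp

theorem pvSums_cons (L : Nat) (ls : List Nat) (s : Int) :
    ((L :: ls).foldl pvSumStep (s, [])).2 = (s + L) :: (ls.foldl pvSumStep (s + (L : Int), [])).2 := by
  simp only [List.foldl_cons, pvSumStep]
  rw [pvSums_acc ls (s + L) ([] ++ [s + L])]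
  simp

theorem pvG_skip (t : List (Int × Int)) : ∀ (r : List (Int × Int)) (prev i : Int),
    (∀ y ∈ t, y.1 = prev) → pvG prev i (t ++ r) = pvG prev (i + t.length) r := by
  induction t with
  | nil => intro r prev i _; simp
  | cons y t ih =>
    intro r prev i h
    obtain ⟨ep, st⟩ := y
    have he : ep = prev := h (ep, st) (by simp)
    have h2 : ∀ z ∈ t, z.1 = prev := fun z hz => h z (by simp [hz])
    rw [List.cons_append, he]
    calc pvG prev i ((prev, st) :: (t ++ r))
        = pvG prev (i + 1) (t ++ r) := by simp [pvG]
      _ = pvG prev (i + 1 + t.length) r := ih r prev (i + 1) h2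
      _ = pvG prev (i + ((prev, st) :: t).length) r := by
            simp only [List.length_cons]
            push_cast
            have harg : i + 1 + (t.length : Int) = i + ((t.length : Int) + 1) := by ring
            rw [harg]

theorem pvB_main : ∀ (n : Nat) (xs : List (Int × Int)), xs.length ≤ n → ∀ (e : Int) (ofs : Int),
    pvG e (ofs + 1) xs = (((pvRunLens ((e, 0) :: xs)).dropLast).foldl pvSumStep (ofs, [])).2 := by
  intro n
  induction n with
  | zero =>
    intro xs h e ofs
    have hx : xs = [] := List.length_eq_zero_iff.mp (Nat.le_zero.mp h)
    subst hx
    simp [pvG, pvRunLens]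
  | succ n ih =>
    intro xs h e ofs
    have hsplit := List.takeWhile_append_dropWhile (p := fun y => y.1 == e) (l := xs)
    have hrl : pvRunLens ((e, 0) :: xs)
        = (1 + (xs.takeWhile (fun y => y.1 == e)).length)
            :: pvRunLens (xs.dropWhile (fun y => y.1 == e)) := by
      simp [pvRunLens]
    have hmem : ∀ y ∈ xs.takeWhile (fun y => y.1 == e), y.1 = e := by
      intro y hy
      have := List.mem_takeWhile_imp hy
      simpa using this
    have hg : pvG e (ofs + 1) xs
        = pvG e (ofs + 1 + (xs.takeWhile (fun y => y.1 == e)).length)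
            (xs.dropWhile (fun y => y.1 == e)) := by
      conv_lhs => rw [← hsplit]
      exact pvG_skip _ _ e (ofs + 1) hmem
    cases hdc : xs.dropWhile (fun y => y.1 == e) with
    | nil =>
      rw [hg, hdc, hrl, hdc]
      simp [pvG, pvRunLens]
    | cons y d' =>
      obtain ⟨ep, st⟩ := y
      have hne : ¬ (ep = e) := by
        have := List.head?_dropWhile_not (fun y => y.1 == e) xs
        rw [hdc] at this
        simpa using this
      have hlen : d'.length ≤ n := by
        have h1 : (xs.dropWhile (fun y => y.1 == e)).length ≤ xs.length :=
          List.length_dropWhile_le _ _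
        rw [hdc] at h1
        simp at h1
        omega
      rw [hg, hdc]
      simp only [pvG, if_neg hne]
      rw [hrl, hdc]
      rw [List.dropLast_cons_of_ne_nil (by simp [pvRunLens])]
      rw [pvSums_cons]
      have hrec := ih d' hlen ep (ofs + 1 + (xs.takeWhile (fun y => y.1 == e)).length)
      have hrl3 : pvRunLens ((ep, st) :: d') = pvRunLens ((ep, 0) :: d') := by
        simp [pvRunLens]
      rw [hrl3]
      have heq : ofs + ((1 + (xs.takeWhile (fun y => y.1 == e)).length : Nat) : Int)
          = ofs + 1 + ((xs.takeWhile (fun y => y.1 == e)).length : Int) := by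
        push_cast; ring
      rw [heq, ← hrec]

theorem pvAltRun (sorted_pairs : List (Int × Int)) :
    episode_boundaries_py sorted_pairs = episode_boundaries_py_alt sorted_pairs := by
  cases sorted_pairs with
  | nil => simp [episode_boundaries_py, episode_boundaries_py_alt, PySem.List.enumerate, pvRunLens]
  | cons x xs =>
    obtain ⟨ep, st⟩ := x
    have hA : episode_boundaries_py ((ep, st) :: xs) = pvG ep 1 xs := by
      unfold episode_boundaries_py
      rw [PySem.List.enumerate_cons]
      simp only [List.foldl_cons]
      have hs : pvStepA ([], none) (0, (ep, st)) = ([], some ep) := by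
        simp [pvStepA]
      rw [hs]
      simpa using pvA_foldl xs 1 [] ep (by omega)
    have hB : episode_boundaries_py_alt ((ep, st) :: xs)
        = (((pvRunLens ((ep, 0) :: xs)).dropLast).foldl pvSumStep (0, [])).2 := by
      unfold episode_boundaries_py_alt
      have : pvRunLens ((ep, st) :: xs) = pvRunLens ((ep, 0) :: xs) := by
        simp [pvRunLens]
      rw [this]
    rw [hA, hB]
    have := pvB_main xs.length xs (le_refl _) ep 0
    simpa using this

-- ===== VERDICT (by name: the statement is the Claim_ definition above) =====
theorem episode_boundaries_py_spec : Claim_equal_episode_boundaries_py := by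
  intro sorted_pairs _
  unfold Spec_episode_boundaries_py
  exact pvAltRun sorted_pairs
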